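-- pv_equiv track=rewrite | github.com/opensvc/collector | init/models/converters.py | convert_duration
-- ===== SOURCE A (Python) =====
-- def convert_duration(s, _to="s", _from="s"):
--     """
--     Convert a string representation of a duration to seconds.
--     Supported units (case insensitive):
--       w: week
--       d: day
--       h: hour
--       m: minute
--       s: second
--     Example:
--       1w => 604800
--       1d => 86400
--       1h => 3600
--       1h1m => 3660
--       1h2s => 3602
--       1 => 1
--     """
--     if s is None:
--         raise ValueError("convert duration error: None is not a valid duration")
--
--     units = {
--         "w": 604800,
--         "d": 86400,
--         "h": 3600,
--         "m": 60,
--         "s": 1,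
--     }
--
--     if _from not in units:
--         raise ValueError("convert duration error: unsupported input unit %s" % _from)
--     if _to not in units:
--         raise ValueError("convert duration error: unsupported target unit %s" % _to)
--
--     try:
--         s = int(s)
--         return s * units[_from] // units[_to]
--     except ValueError:
--         pass
--
--     s = s.lower()
--     duration = 0
--     prev = 0
--     for idx, unit in enumerate(s):
--         if unit not in units:
--             continue
--         _duration = s[prev:idx]
--         try:
--             _duration = int(_duration)
--         except ValueError:
--             raise ValueError("convert duration error: invalid format %s at index %d" % (s, idx))
--         duration += _duration * units[unit]
--         prev = idx + 1
--
--     return duration // units[_to]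
-- ===== SOURCE B (Python) =====
-- def convert_duration(s, _to="s", _from="s"):
--     if s is None:
--         raise ValueError("convert duration error: None is not a valid duration")
--
--     units = {
--         "w": 604800,
--         "d": 86400,
--         "h": 3600,
--         "m": 60,
--         "s": 1,
--     }
--
--     if _from not in units:
--         raise ValueError("convert duration error: unsupported input unit %s" % _from)
--     if _to not in units:
--         raise ValueError("convert duration error: unsupported target unit %s" % _to)
--
--     try:
--         return int(s) * units[_from] // units[_to]
--     except ValueError:
--         pass
--
--     # tokenize-then-reduce: split the lowered string into (segment, multiplier)
--     # pairs at each unit letter, then sum the parsed segments.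
--     tokens = []
--     seg = []
--     for ch in s.lower():
--         if ch in units:
--             tokens.append(("".join(seg), units[ch]))
--             seg = []
--         else:
--             seg.append(ch)
--
--     total = sum(int(num) * mult for num, mult in tokens)
--     return total // units[_to]
-- ===== Notes on version B (the rewrite author's own statement) =====
-- stated objective: alternative
-- what changed: A scans the lowered string with an index/prev pair and slices s[prev:idx] at each unit letter; B first tokenizes the string into (segment, multiplier) pairs in one pass and then reduces the token list with a sum.
import Mathlib
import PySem

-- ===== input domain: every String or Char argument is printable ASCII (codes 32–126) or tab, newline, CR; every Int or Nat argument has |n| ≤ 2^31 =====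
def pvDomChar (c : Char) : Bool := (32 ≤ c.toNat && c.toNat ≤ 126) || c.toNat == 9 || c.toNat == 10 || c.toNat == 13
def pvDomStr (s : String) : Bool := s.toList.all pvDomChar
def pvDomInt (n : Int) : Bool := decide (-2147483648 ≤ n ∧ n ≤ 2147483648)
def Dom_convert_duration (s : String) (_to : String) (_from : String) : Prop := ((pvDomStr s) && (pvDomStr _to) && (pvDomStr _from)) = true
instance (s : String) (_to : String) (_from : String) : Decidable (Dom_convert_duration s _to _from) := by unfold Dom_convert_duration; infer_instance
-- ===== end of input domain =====

-- B replaces A's prev-index scan with string slicing by a tokenize-then-reduce decomposition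
-- (split the lowered string into (segment, multiplier) pairs, then sum); objective: alternative.

-- ===== PORT A =====
-- the units dict, keyed by 1-char strings; a single char's membership/value is looked up by char (exact)
def cdUnitC (c : Char) : Option Int :=
  match c with
  | 'w' => some 604800
  | 'd' => some 86400
  | 'h' => some 3600
  | 'm' => some 60
  | 's' => some 1
  | _ => none

def cdUnit (u : String) : Option Int :=
  match u.toList with
  | [c] => cdUnitC c
  | _ => none

-- B's first pass: split the char list at unit letters into (segment, multiplier) tokens
def cdTokenize : List Char → List Char → List (List Char × Int)
  | [], _seg => []
  | c :: rest, seg =>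
    match cdUnitC c with
    | some u => (seg, u) :: cdTokenize rest []
    | none => cdTokenize rest (seg ++ [c])

-- B's second pass: sum int(num) * mult over the tokens (none = some int() raised)
def cdStepB (acc : Option Int) (t : List Char × Int) : Option Int :=
  match acc, PySem.Int.ofChars? t.1 with
  | some a, some d => some (a + d * t.2)
  | _, _ => none

-- A's loop body over the lowered char list cs: state = some (duration, prev), none = ValueError raised
def cdStepA (cs : List Char) (st : Option (Int × Int)) (p : Int × Char) : Option (Int × Int) :=
  match st with
  | none => none
  | some (dur, prev) =>
    match cdUnitC p.2 with
    | none => some (dur, prev)                                     -- unit not in units: continue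
    | some u =>
      match PySem.Int.ofChars? (PySem.List.slice cs (some prev) (some p.1)) with
      | none => none                                               -- int(s[prev:idx]) raises (outside Pre_)
      | some d => some (dur + d * u, p.1 + 1)

def convert_duration (s : String) (_to : String) (_from : String) : Int :=
  match cdUnit _from, cdUnit _to with
  | some uf, some ut =>
    (match PySem.Int.ofStr? s with
     | some n => PySem.Int.floordiv (n * uf) ut                    -- int(s) fast path
     | none =>
       let cs := PySem.Chars.lower s.toList                        -- s = s.lower()
       match (PySem.List.enumerate cs 0).foldl (cdStepA cs) (some ((0 : Int), (0 : Int))) with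
       | none => 0                                                 -- Python raises here (outside Pre_)
       | some (dur, _) => PySem.Int.floordiv dur ut)
  | _, _ => 0                                                      -- unsupported unit: Python raises (outside Pre_)

-- ===== PORT B =====
def convert_duration_alt (s : String) (_to : String) (_from : String) : Int :=
  (cdUnit _from).elim 0 (fun uf =>                                 -- none: Python raises (outside Pre_)
    (cdUnit _to).elim 0 (fun ut =>                                 -- none: Python raises (outside Pre_)
      (PySem.Int.ofStr? s).elim
        (((cdTokenize (PySem.Chars.lower s.toList) []).foldl cdStepB (some 0)).elim
          0                                                        -- some int() raised (outside Pre_)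
          (fun total => PySem.Int.floordiv total ut))
        (fun n => PySem.Int.floordiv (n * uf) ut)))                -- int(s) fast path

-- ===== PRECONDITION & SPEC =====
-- Pre_ excludes exactly the inputs where Python A raises ValueError: a _from/_to outside the
-- units dict, or a non-int s in which, before some unit letter, the maximal unit-free segment
-- (the unit-free suffix of what precedes that letter) is not an int literal.
def Pre_convert_duration (s : String) (_to : String) (_from : String) : Prop :=
  (cdUnit _from).isSome = true ∧ (cdUnit _to).isSome = true ∧
    ((PySem.Int.ofStr? s).isSome = true ∨
      ∀ i : Nat, i < (PySem.Chars.lower s.toList).length →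
        (cdUnitC ((PySem.Chars.lower s.toList).getD i ' ')).isSome = true →
        (PySem.Int.ofChars?
          ((((PySem.Chars.lower s.toList).take i).reverse.takeWhile
            (fun c => (cdUnitC c).isNone)).reverse)).isSome = true)
instance (s : String) (_to : String) (_from : String) : Decidable (Pre_convert_duration s _to _from) := by unfold Pre_convert_duration; infer_instance

def pvWitness_convert_duration : String × String × String := ("1h1m", "s", "s")

def Spec_convert_duration (s : String) (_to : String) (_from : String) (out : Int) : Prop := out = convert_duration_alt s _to _from
instance (s : String) (_to : String) (_from : String) (out : Int) : Decidable (Spec_convert_duration s _to _from out) := by unfold Spec_convert_duration; infer_instance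

-- ===== CLAIM (what is proved, stated in full; the proofs are below) =====
def Claim_equal_convert_duration : Prop := ∀ (s : String) (_to : String) (_from : String), Dom_convert_duration s _to _from → Pre_convert_duration s _to _from → Spec_convert_duration s _to _from (convert_duration s _to _from)

-- ===== LEMMAS AND PROOFS =====

lemma cd_foldA_none (cs : List Char) (l : List (Int × Char)) :
    l.foldl (cdStepA cs) none = none := by
  induction l with
  | nil => rfl
  | cons p l ih => simpa [cdStepA] using ih

lemma cd_foldB_none (l : List (List Char × Int)) :
    l.foldl cdStepB none = none := by
  induction l with
  | nil => rfl
  | cons t l ih => simpa [cdStepB] using ih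

-- extending a slice by one character
lemma cd_slice_snoc (cs : List Char) (prev j : Nat) (h : prev ≤ j) :
    PySem.List.slice cs (some (prev : Int)) (some ((j + 1 : Nat) : Int)) =
      PySem.List.slice cs (some (prev : Int)) (some (j : Int)) ++ (cs.drop j).take 1 := by
  rw [PySem.List.slice_natCast, PySem.List.slice_natCast]
  have e1 : j + 1 - prev = (j - prev) + 1 := by omega
  have hd : (cs.drop prev).drop (j - prev) = cs.drop j := by
    rw [List.drop_drop]
    congr 1
    omega
  rw [e1, List.take_add, hd]

-- loop invariant: A's scan from index j with pending segment cs[prev:j] = seg computes,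
-- projected to the duration, exactly B's reduce over the tokens of the remaining chars.
lemma cd_loop_eq (cs : List Char) (rest : List Char) : ∀ (j prev : Nat) (dur : Int) (seg : List Char),
    prev ≤ j →
    PySem.List.slice cs (some (prev : Int)) (some (j : Int)) = seg →
    cs.drop j = rest →
    ((PySem.List.enumerate rest (j : Int)).foldl (cdStepA cs) (some (dur, (prev : Int)))).map Prod.fst
      = (cdTokenize rest seg).foldl cdStepB (some dur) := by
  induction rest with
  | nil =>
    intro j prev dur seg _ _ _
    simp [PySem.List.enumerate, cdTokenize]
  | cons c rest ih =>
    intro j prev dur seg hpj hseg hdrop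
    have hdrop' : cs.drop (j + 1) = rest := by
      have h1 : (cs.drop j).drop 1 = cs.drop (j + 1) := List.drop_drop ..
      rw [hdrop] at h1
      simpa using h1.symm
    have htake : (cs.drop j).take 1 = [c] := by rw [hdrop]; rfl
    rw [PySem.List.enumerate_cons, List.foldl_cons]
    cases hu : cdUnitC c with
    | none =>
      have hstep : cdStepA cs (some (dur, (prev : Int))) ((j : Int), c) = some (dur, (prev : Int)) := by
        simp [cdStepA, hu]
      rw [hstep]
      have hseg' : PySem.List.slice cs (some (prev : Int)) (some ((j + 1 : Nat) : Int)) = seg ++ [c] := by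
        rw [cd_slice_snoc cs prev j hpj, hseg, htake]
      have := ih (j + 1) prev dur (seg ++ [c]) (by omega) hseg' hdrop'
      rw [cdTokenize]
      simp only [hu]
      rw [← this]
      push_cast
      rfl
    | some u =>
      cases hp : PySem.Int.ofChars? seg with
      | none =>
        have hstep : cdStepA cs (some (dur, (prev : Int))) ((j : Int), c) = none := by
          simp [cdStepA, hu, hseg, hp]
        rw [hstep, cd_foldA_none]
        rw [cdTokenize]
        simp only [hu, List.foldl_cons]
        have hb : cdStepB (some dur) (seg, u) = none := by simp [cdStepB, hp]
        rw [hb, cd_foldB_none]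
        rfl
      | some d =>
        have hstep : cdStepA cs (some (dur, (prev : Int))) ((j : Int), c) = some (dur + d * u, (j : Int) + 1) := by
          simp [cdStepA, hu, hseg, hp]
        rw [hstep]
        have hseg0 : PySem.List.slice cs (some ((j + 1 : Nat) : Int)) (some ((j + 1 : Nat) : Int)) = ([] : List Char) := by
          rw [PySem.List.slice_natCast]; simp
        have := ih (j + 1) (j + 1) (dur + d * u) [] (le_refl _) hseg0 hdrop'
        rw [cdTokenize]
        simp only [hu, List.foldl_cons]
        have hb : cdStepB (some dur) (seg, u) = some (dur + d * u) := by simp [cdStepB, hp]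
        rw [hb, ← this]
        push_cast
        rfl

-- ===== VERDICT (by name: the statement is the Claim_ definition above) =====
theorem convert_duration_spec : Claim_equal_convert_duration := by
  intro s _to _from _hdom _hpre
  unfold Spec_convert_duration convert_duration convert_duration_alt
  cases hf : cdUnit _from with
  | none => cases ht : cdUnit _to <;> rfl
  | some uf =>
    cases ht : cdUnit _to with
    | none => rfl
    | some ut =>
      cases hs : PySem.Int.ofStr? s with
      | some n => rfl
      | none =>
        simp only [Option.elim_some, Option.elim_none]
        set cs := PySem.Chars.lower s.toList with hcs
        have hseg0 : PySem.List.slice cs (some ((0 : Nat) : Int)) (some ((0 : Nat) : Int)) = ([] : List Char) := by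
          rw [PySem.List.slice_natCast]; simp
        have key := cd_loop_eq cs cs 0 0 0 [] (le_refl 0) hseg0 (by simp)
        push_cast at key
        cases hA : (PySem.List.enumerate cs (0 : Int)).foldl (cdStepA cs) (some ((0 : Int), (0 : Int))) with
        | none =>
          rw [hA] at key
          simp only [Option.map_none] at key
          rw [← key]
          rfl
        | some p =>
          rw [hA] at key
          simp only [Option.map_some] at key
          rw [← key]
          rfl
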